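-- pv_equiv track=rewrite | github.com/xzavierxu-pixel/FORTUNE_BOT | execution_engine/online/execution/monitor.py | _latest_orders_by_attempt
-- ===== SOURCE A (Python) =====
-- from typing import Any, Dict, List
--
-- def _latest_orders_by_attempt(rows: List[Dict[str, Any]]) -> Dict[str, Dict[str, Any]]:
--     latest: Dict[str, Dict[str, Any]] = {}
--     for row in rows:
--         order_attempt_id = str(row.get("order_attempt_id", "") or "")
--         if not order_attempt_id:
--             continue
--         prior = latest.get(order_attempt_id)
--         current_ts = str(row.get("updated_at_utc") or row.get("created_at_utc") or "")
--         prior_ts = str((prior or {}).get("updated_at_utc") or (prior or {}).get("created_at_utc") or "")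
--         if prior is None or current_ts >= prior_ts:
--             latest[order_attempt_id] = row
--     return latest
-- ===== SOURCE B (Python) =====
-- from typing import Any, Dict, List
--
--
-- def _ts(row):
--     return str(row.get("updated_at_utc") or row.get("created_at_utc") or "")
--
--
-- def _pick_latest(group):
--     best = group[0]
--     for row in group[1:]:
--         if _ts(row) >= _ts(best):
--             best = row
--     return best
--
--
-- def _latest_orders_by_attempt(rows: List[Dict[str, Any]]) -> Dict[str, Dict[str, Any]]:
--     groups: Dict[str, List[Dict[str, Any]]] = {}
--     for row in rows:
--         key = str(row.get("order_attempt_id", "") or "")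
--         if key:
--             groups.setdefault(key, []).append(row)
--     return {key: _pick_latest(group) for key, group in groups.items()}
-- ===== Notes on version B (the rewrite author's own statement) =====
-- stated objective: alternative
-- what changed: A keeps one running 'latest' row per attempt_id in a single pass; B first groups all rows into a dict of per-id lists and then reduces each group to its last max-timestamp row in a separate pass.
import Mathlib
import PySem

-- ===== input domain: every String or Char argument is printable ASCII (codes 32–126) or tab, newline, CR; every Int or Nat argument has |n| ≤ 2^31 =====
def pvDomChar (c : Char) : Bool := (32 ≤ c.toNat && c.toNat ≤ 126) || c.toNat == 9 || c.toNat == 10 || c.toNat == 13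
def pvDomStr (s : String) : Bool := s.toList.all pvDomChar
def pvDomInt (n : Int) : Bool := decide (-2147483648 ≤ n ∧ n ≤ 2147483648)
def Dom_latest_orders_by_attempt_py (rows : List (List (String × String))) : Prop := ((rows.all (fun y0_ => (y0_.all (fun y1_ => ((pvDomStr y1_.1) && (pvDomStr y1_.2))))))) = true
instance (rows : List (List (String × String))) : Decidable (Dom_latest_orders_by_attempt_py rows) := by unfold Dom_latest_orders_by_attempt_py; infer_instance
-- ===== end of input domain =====

-- B replaces A's single running-'best' loop by a grouping pass (dict of per-id row lists) plus a
-- per-group reduction; objective: alternative decomposition, same exact result (return value only).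

-- ===== PORT A =====
-- literal transliteration of A: one fold keeping, per non-empty order_attempt_id, the running
-- latest row (>= lets the later row win ties); returned as the dict's items list.
def latest_orders_by_attempt_py (rows : List (List (String × String))) : List (String × List (String × String)) :=
  (rows.foldl
    (fun (latest : PySem.Dict String (List (String × String))) row =>
      let d : PySem.Dict String String := PySem.Dict.mk row
      -- str(row.get("order_attempt_id", "") or "") : on strings this is just the "" -defaulted lookup
      let order_attempt_id : String := PySem.Dict.getD d "order_attempt_id" ""
      if order_attempt_id = "" then latest
      else
        let prior : Option (List (String × String)) := PySem.Dict.get? latest order_attempt_id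
        -- str(row.get("updated_at_utc") or row.get("created_at_utc") or "") : first truthy, else ""
        let current_ts : String :=
          match PySem.Dict.get? d "updated_at_utc" with
          | some s => if s = "" then (PySem.Dict.get? d "created_at_utc").getD "" else s
          | none => (PySem.Dict.get? d "created_at_utc").getD ""
        let prior_ts : String :=
          match prior with
          | none => ""
          | some p =>
            match PySem.Dict.get? (PySem.Dict.mk p) "updated_at_utc" with
            | some s => if s = "" then (PySem.Dict.get? (PySem.Dict.mk p) "created_at_utc").getD "" else s
            | none => (PySem.Dict.get? (PySem.Dict.mk p) "created_at_utc").getD ""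
        if prior.isNone || decide (prior_ts ≤ current_ts) then PySem.Dict.insert latest order_attempt_id row
        else latest)
    PySem.Dict.empty).items

-- ===== PORT B =====
-- _ts(row): first truthy of updated_at_utc / created_at_utc, else ""
def pvAltTs (row : List (String × String)) : String :=
  match PySem.Dict.get? (PySem.Dict.mk row) "updated_at_utc" with
  | some s => if s = "" then (PySem.Dict.get? (PySem.Dict.mk row) "created_at_utc").getD "" else s
  | none => (PySem.Dict.get? (PySem.Dict.mk row) "created_at_utc").getD ""

-- _pick_latest(group): best = group[0]; for row in group[1:]: if _ts(row) >= _ts(best): best = row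
def pvPickLatest (group : List (List (String × String))) : List (String × String) :=
  match group with
  | [] => []   -- unreachable in B: groups only ever hold nonempty lists (Python's group[0])
  | best :: rest => rest.foldl (fun best row => if pvAltTs best ≤ pvAltTs row then row else best) best

def latest_orders_by_attempt_py_alt (rows : List (List (String × String))) : List (String × List (String × String)) :=
  let groups : PySem.Dict String (List (List (String × String))) :=
    rows.foldl
      (fun groups row =>
        let key : String := PySem.Dict.getD (PySem.Dict.mk row) "order_attempt_id" ""
        if key = "" then groups
        else PySem.Dict.modify groups key [] (· ++ [row]))
      PySem.Dict.empty
  groups.items.map (fun p => (p.1, pvPickLatest p.2))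

-- ===== PRECONDITION & SPEC =====
def Spec_latest_orders_by_attempt_py (rows : List (List (String × String))) (out : List (String × List (String × String))) : Prop := out = latest_orders_by_attempt_py_alt rows
instance (rows : List (List (String × String))) (out : List (String × List (String × String))) : Decidable (Spec_latest_orders_by_attempt_py rows out) := by unfold Spec_latest_orders_by_attempt_py; infer_instance

-- ===== CLAIM (what is proved, stated in full; the proofs are below) =====
def Claim_equal_latest_orders_by_attempt_py : Prop := ∀ (rows : List (List (String × String))), Dom_latest_orders_by_attempt_py rows → Spec_latest_orders_by_attempt_py rows (latest_orders_by_attempt_py rows)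

-- ===== LEMMAS AND PROOFS =====

-- A's loop step, named (definitionally the lambda inside latest_orders_by_attempt_py)
def pvStepA (latest : PySem.Dict String (List (String × String))) (row : List (String × String)) :
    PySem.Dict String (List (String × String)) :=
  let d : PySem.Dict String String := PySem.Dict.mk row
  let order_attempt_id : String := PySem.Dict.getD d "order_attempt_id" ""
  if order_attempt_id = "" then latest
  else
    let prior : Option (List (String × String)) := PySem.Dict.get? latest order_attempt_id
    let current_ts : String :=
      match PySem.Dict.get? d "updated_at_utc" with
      | some s => if s = "" then (PySem.Dict.get? d "created_at_utc").getD "" else s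
      | none => (PySem.Dict.get? d "created_at_utc").getD ""
    let prior_ts : String :=
      match prior with
      | none => ""
      | some p =>
        match PySem.Dict.get? (PySem.Dict.mk p) "updated_at_utc" with
        | some s => if s = "" then (PySem.Dict.get? (PySem.Dict.mk p) "created_at_utc").getD "" else s
        | none => (PySem.Dict.get? (PySem.Dict.mk p) "created_at_utc").getD ""
    if prior.isNone || decide (prior_ts ≤ current_ts) then PySem.Dict.insert latest order_attempt_id row
    else latest

-- B's grouping step, named
def pvStepB (groups : PySem.Dict String (List (List (String × String)))) (row : List (String × String)) :
    PySem.Dict String (List (List (String × String))) :=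
  let key : String := PySem.Dict.getD (PySem.Dict.mk row) "order_attempt_id" ""
  if key = "" then groups
  else PySem.Dict.modify groups key [] (· ++ [row])

def pvF (p : String × List (List (String × String))) : String × List (String × String) :=
  (p.1, pvPickLatest p.2)

def pvCollapse (g : PySem.Dict String (List (List (String × String)))) :
    PySem.Dict String (List (String × String)) :=
  PySem.Dict.mk (g.items.map pvF)

theorem pvA_eq (rows : List (List (String × String))) :
    latest_orders_by_attempt_py rows = (rows.foldl pvStepA PySem.Dict.empty).items := rfl

theorem pvB_eq (rows : List (List (String × String))) :
    latest_orders_by_attempt_py_alt rows = ((rows.foldl pvStepB PySem.Dict.empty).items).map pvF := rfl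

theorem pvKeys_collapse (g : PySem.Dict String (List (List (String × String)))) :
    (pvCollapse g).keys = g.keys := by
  obtain ⟨l⟩ := g
  simp [pvCollapse, PySem.Dict.keys_mk, pvF, Function.comp]

theorem pvGet?_collapse (g : PySem.Dict String (List (List (String × String)))) (k : String) :
    (pvCollapse g).get? k = (g.get? k).map pvPickLatest := by
  obtain ⟨l⟩ := g
  induction l with
  | nil => rfl
  | cons p rest ih =>
    obtain ⟨a, b⟩ := p
    show (PySem.Dict.mk ((a, pvPickLatest b) :: rest.map pvF)).get? k = _
    rw [PySem.Dict.get?_mk_cons, PySem.Dict.get?_mk_cons]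
    by_cases h : (a == k) = true
    · rw [if_pos h, if_pos h]
      rfl
    · rw [if_neg h, if_neg h]
      exact ih

theorem pvPick_append (gr : List (List (String × String))) (row : List (String × String)) (h : gr ≠ []) :
    pvPickLatest (gr ++ [row]) =
      if pvAltTs (pvPickLatest gr) ≤ pvAltTs row then row else pvPickLatest gr := by
  cases gr with
  | nil => exact absurd rfl h
  | cons b t =>
    show List.foldl (fun best row => if pvAltTs best ≤ pvAltTs row then row else best) b (t ++ [row]) = _
    rw [List.foldl_append]
    rfl

-- groups.setdefault(key, []).append(row) : modify IS insert of the appended getD value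
theorem pvModify_eq (g : PySem.Dict String (List (List (String × String)))) (k : String)
    (row : List (String × String)) :
    PySem.Dict.modify g k [] (· ++ [row]) = PySem.Dict.insert g k (PySem.Dict.getD g k [] ++ [row]) := rfl

theorem pvItems_collapse (g : PySem.Dict String (List (List (String × String)))) :
    (pvCollapse g).items = g.items.map pvF := rfl

theorem pvStep_eq (g : PySem.Dict String (List (List (String × String))))
    (hnd : g.keys.Nodup) (hne : ∀ p ∈ g.items, p.2 ≠ []) (row : List (String × String)) :
    pvStepA (pvCollapse g) row = pvCollapse (pvStepB g row) := by
  by_cases hk : PySem.Dict.getD (PySem.Dict.mk row) "order_attempt_id" "" = ""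
  · simp [pvStepA, pvStepB, hk]
  · set k := PySem.Dict.getD (PySem.Dict.mk row) "order_attempt_id" "" with hkdef
    cases hc : g.contains k with
    | false =>
      have hgc : g.get? k = none := (PySem.Dict.get?_eq_none_iff_contains g k).mpr hc
      have hpc : (pvCollapse g).contains k = false := by
        rw [PySem.Dict.contains_eq_decide_mem_keys, pvKeys_collapse,
          ← PySem.Dict.contains_eq_decide_mem_keys, hc]
      have hprior : (pvCollapse g).get? k = none := by
        rw [pvGet?_collapse, hgc]; rfl
      have hA : pvStepA (pvCollapse g) row = PySem.Dict.insert (pvCollapse g) k row := by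
        simp only [pvStepA, ← hkdef, if_neg hk, hprior]
        simp
      have hB : pvStepB g row = PySem.Dict.insert g k ([] ++ [row]) := by
        simp only [pvStepB, ← hkdef, if_neg hk, pvModify_eq, PySem.Dict.getD_of_not_contains g _ hc]
      rw [hA, hB]
      apply PySem.Dict.ext
      rw [PySem.Dict.items_insert_of_not_contains _ _ hpc, pvItems_collapse,
        pvItems_collapse, PySem.Dict.items_insert_of_not_contains _ _ hc]
      simp [pvF, pvPickLatest]
    | true =>
      obtain ⟨gr, hgr⟩ : ∃ gr, g.get? k = some gr := by
        have := PySem.Dict.contains_eq_isSome_get? g k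
        rw [hc] at this
        exact Option.isSome_iff_exists.mp this.symm
      have hgrne : gr ≠ [] := hne (k, gr) (PySem.Dict.mem_items_of_get?_eq_some g hgr)
      have hprior : (pvCollapse g).get? k = some (pvPickLatest gr) := by
        rw [pvGet?_collapse, hgr]; rfl
      have hcc : (pvCollapse g).contains k = true := by
        rw [PySem.Dict.contains_eq_decide_mem_keys, pvKeys_collapse,
          ← PySem.Dict.contains_eq_decide_mem_keys, hc]
      have hgetD : PySem.Dict.getD g k [] = gr := PySem.Dict.getD_of_get?_eq_some g [] hgr
      have hpick := pvPick_append gr row hgrne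
      have hB : pvStepB g row = PySem.Dict.insert g k (gr ++ [row]) := by
        simp only [pvStepB, ← hkdef, if_neg hk, pvModify_eq, hgetD]
      have hA : pvStepA (pvCollapse g) row =
          if pvAltTs (pvPickLatest gr) ≤ pvAltTs row then
            PySem.Dict.insert (pvCollapse g) k row
          else pvCollapse g := by
        simp only [pvStepA, ← hkdef, if_neg hk, hprior, Option.isNone_some, Bool.false_or,
          decide_eq_true_eq]
        rfl
      rw [hA, hB]
      by_cases hle : pvAltTs (pvPickLatest gr) ≤ pvAltTs row
      · rw [if_pos hle]
        apply PySem.Dict.ext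
        rw [PySem.Dict.items_insert_of_contains _ _ hcc, pvItems_collapse, pvItems_collapse,
          PySem.Dict.items_insert_of_contains _ _ hc, List.map_map, List.map_map]
        apply List.map_congr_left
        intro p _
        by_cases hpk : (p.1 == k) = true
        · simp [Function.comp, pvF, hpk, hpick, hle]
        · simp [Function.comp, pvF, hpk]
      · rw [if_neg hle]
        apply PySem.Dict.ext
        rw [pvItems_collapse, pvItems_collapse, PySem.Dict.items_insert_of_contains _ _ hc,
          List.map_map]
        apply List.map_congr_left
        intro p hp
        by_cases hpk : (p.1 == k) = true
        · have hp1 : p.1 = k := by simpa using hpk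
          have hget : g.get? p.1 = some p.2 := by
            obtain ⟨a, b⟩ := p
            exact PySem.Dict.get?_of_mem_items g hp hnd
          rw [hp1, hgr] at hget
          have hp2 : p.2 = gr := by injection hget with hx; exact hx.symm
          obtain ⟨a, b⟩ := p
          simp only at hp1 hp2
          subst hp1 hp2
          simp [Function.comp, pvF, hpick, hle]
        · simp [Function.comp, pvF, hpk]

theorem pvInv_step (g : PySem.Dict String (List (List (String × String))))
    (hnd : g.keys.Nodup) (hne : ∀ p ∈ g.items, p.2 ≠ []) (row : List (String × String)) :
    (pvStepB g row).keys.Nodup ∧ ∀ p ∈ (pvStepB g row).items, p.2 ≠ [] := by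
  by_cases hk : PySem.Dict.getD (PySem.Dict.mk row) "order_attempt_id" "" = ""
  · simp only [pvStepB, if_pos hk]
    exact ⟨hnd, hne⟩
  · simp only [pvStepB, if_neg hk, pvModify_eq]
    refine ⟨PySem.Dict.nodup_keys_insert _ _ _ hnd, ?_⟩
    intro p hp
    rcases (PySem.Dict.mem_items_insert _ _ _ p).mp hp with h | ⟨h, _⟩
    · subst h; simp
    · exact hne p h

theorem pvLoop (rows : List (List (String × String))) :
    ∀ (g : PySem.Dict String (List (List (String × String)))),
      g.keys.Nodup → (∀ p ∈ g.items, p.2 ≠ []) →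
      rows.foldl pvStepA (pvCollapse g) = pvCollapse (rows.foldl pvStepB g) := by
  induction rows with
  | nil => intro g _ _; rfl
  | cons row rest ih =>
    intro g hnd hne
    simp only [List.foldl_cons]
    rw [pvStep_eq g hnd hne row]
    exact ih (pvStepB g row) (pvInv_step g hnd hne row).1 (pvInv_step g hnd hne row).2

-- ===== VERDICT (by name: the statement is the Claim_ definition above) =====
theorem latest_orders_by_attempt_py_spec : Claim_equal_latest_orders_by_attempt_py := by
  intro rows _
  show latest_orders_by_attempt_py rows = latest_orders_by_attempt_py_alt rows
  rw [pvA_eq, pvB_eq]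
  have h0 : (PySem.Dict.empty : PySem.Dict String (List (String × String))) =
      pvCollapse PySem.Dict.empty := rfl
  rw [h0, pvLoop rows PySem.Dict.empty (by simp [PySem.Dict.keys_empty]) (by intro p hp; simp [PySem.Dict.empty] at hp)]
  rfl
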